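-- pv_equiv track=rewrite | github.com/rwwiv/advent-of-code-2022 | day3/day3.py | first_sim_pt1
-- ===== SOURCE A (Python) =====
-- def first_sim_pt1(s1: list[str], s2: list[str]) -> str | None:
--     m: dict[str, bool] = {}
--     for ks1 in s1:
--         m[ks1] = True
--     for ks2 in s2:
--         if m.get(ks2):
--             return ks2
--
--     return None
-- ===== SOURCE B (Python) =====
-- def first_sim_pt1(s1: list[str], s2: list[str]) -> str | None:
--     pos: dict[str, int] = {}
--     for i, x in enumerate(s2):
--         if x not in pos:
--             pos[x] = i
--     best: int | None = None
--     for x in s1: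
--         j = pos.get(x)
--         if j is not None and (best is None or j < best):
--             best = j
--     return None if best is None else s2[best]
-- ===== Notes on version B (the rewrite author's own statement) =====
-- stated objective: alternative
-- what changed: B inverts A's strategy: instead of hashing s1 and scanning s2 for the first hit, it indexes s2 by first position, scans s1 tracking the minimal position of any shared element, and returns s2[best].
import Mathlib
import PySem

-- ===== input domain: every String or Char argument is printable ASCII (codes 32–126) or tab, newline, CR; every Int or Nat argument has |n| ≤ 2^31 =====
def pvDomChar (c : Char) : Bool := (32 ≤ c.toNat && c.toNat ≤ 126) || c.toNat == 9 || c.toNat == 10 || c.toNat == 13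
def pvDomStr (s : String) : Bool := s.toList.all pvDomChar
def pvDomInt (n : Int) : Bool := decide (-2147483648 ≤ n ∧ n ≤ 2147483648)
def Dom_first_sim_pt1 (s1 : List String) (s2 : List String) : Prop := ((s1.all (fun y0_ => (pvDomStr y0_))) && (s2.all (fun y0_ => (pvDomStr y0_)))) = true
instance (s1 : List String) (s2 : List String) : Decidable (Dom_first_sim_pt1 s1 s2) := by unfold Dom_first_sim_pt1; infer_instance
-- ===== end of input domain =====

-- B inverts A's strategy: A hashes s1 and scans s2 for the first hit; B indexes s2 by
-- first position, scans s1 for the minimal shared position, and returns s2[best] (alternative).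

-- ===== PORT A =====
-- second loop of A: for ks2 in s2: if m.get(ks2): return ks2
def first_sim_pt1_scan (m : PySem.Dict String Bool) : List String → Option String
  | [] => none
  | ks2 :: rest =>
    match m.get? ks2 with
    | some true => some ks2
    | _ => first_sim_pt1_scan m rest

def first_sim_pt1 (s1 : List String) (s2 : List String) : Option String :=
  let m : PySem.Dict String Bool := s1.foldl (fun d ks1 => d.insert ks1 true) PySem.Dict.empty
  first_sim_pt1_scan m s2

-- ===== PORT B =====
-- first loop of B: for i, x in enumerate(s2): if x not in pos: pos[x] = i
def first_sim_pt1_alt_pos (s2 : List String) : PySem.Dict String Int :=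
  (PySem.List.enumerate s2).foldl
    (fun pos p => if pos.contains p.2 then pos else pos.insert p.2 p.1) PySem.Dict.empty

def first_sim_pt1_alt (s1 : List String) (s2 : List String) : Option String :=
  let pos := first_sim_pt1_alt_pos s2
  -- second loop: j = pos.get(x); if j is not None and (best is None or j < best): best = j
  let best : Option Int := s1.foldl
    (fun best x =>
      match pos.get? x with
      | none => best
      | some j =>
        match best with
        | none => some j
        | some b => if j < b then some j else some b) none
  match best with
  | none => none
  | some b => PySem.List.pyGet? s2 b   -- s2[best]; best is always a valid index here

-- ===== PRECONDITION & SPEC =====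
def Spec_first_sim_pt1 (s1 : List String) (s2 : List String) (out : Option String) : Prop := out = first_sim_pt1_alt s1 s2
instance (s1 : List String) (s2 : List String) (out : Option String) : Decidable (Spec_first_sim_pt1 s1 s2 out) := by unfold Spec_first_sim_pt1; infer_instance

-- ===== CLAIM (what is proved, stated in full; the proofs are below) =====
def Claim_equal_first_sim_pt1 : Prop := ∀ (s1 : List String) (s2 : List String), Dom_first_sim_pt1 s1 s2 → Spec_first_sim_pt1 s1 s2 (first_sim_pt1 s1 s2)

-- ===== LEMMAS AND PROOFS =====

-- the option-min step of B's second loop, named for the proofs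
def omin (best j : Option Int) : Option Int :=
  match j with
  | none => best
  | some j =>
    match best with
    | none => some j
    | some b => if j < b then some j else some b

-- the dict A builds answers exactly list membership in s1
theorem get?_foldl_insert_true (s1 : List String) (d : PySem.Dict String Bool) (x : String) :
    (s1.foldl (fun d ks1 => d.insert ks1 true) d).get? x =
      if x ∈ s1 then some true else d.get? x := by
  induction s1 generalizing d with
  | nil => simp
  | cons a rest ih =>
    simp only [List.foldl_cons, ih, List.mem_cons]
    by_cases hx : x ∈ rest
    · simp [hx]
    · by_cases hxa : x = a
      · simp [PySem.Dict.get?_insert, hxa]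
      · simp [PySem.Dict.get?_insert, hxa]

-- A's scan is List.find? of membership in s1
theorem first_sim_pt1_eq_find? (s1 s2 : List String) :
    first_sim_pt1 s1 s2 = s2.find? (fun x => decide (x ∈ s1)) := by
  unfold first_sim_pt1
  induction s2 with
  | nil => rfl
  | cons a rest ih =>
    simp only [first_sim_pt1_scan, get?_foldl_insert_true, List.find?_cons]
    by_cases h : a ∈ s1
    · simp [h]
    · simpa [h] using ih

-- B's first loop: the dict maps x to its first index in s2 (offset by the enumerate start)
theorem get?_posFold (l : List String) (s : Int) (d : PySem.Dict String Int) (x : String) :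
    ((PySem.List.enumerate l s).foldl
        (fun pos p => if pos.contains p.2 then pos else pos.insert p.2 p.1) d).get? x =
      match d.get? x with
      | some v => some v
      | none => (PySem.List.index? l x).map (fun k => s + (k : Int)) := by
  induction l generalizing s d with
  | nil => cases hd : d.get? x <;> simp [hd]
  | cons a rest ih =>
    rw [PySem.List.enumerate_cons]
    simp only [List.foldl_cons, ih]
    by_cases hc : d.contains a
    · rw [if_pos hc]
      cases hd : d.get? x with
      | some v => simp
      | none =>
        have hxa : x ≠ a := by
          intro h; subst h
          rw [PySem.Dict.contains_eq_isSome_get?, hd] at hc; simp at hc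
        rw [PySem.List.index?_cons_of_ne rest (Ne.symm hxa)]
        cases hix : PySem.List.index? rest x with
        | none => simp
        | some k => simp; ring
    · rw [if_neg hc, PySem.Dict.get?_insert]
      by_cases hxa : x = a
      · rw [if_pos hxa]
        have hd : d.get? x = none := by
          rw [hxa]
          rw [PySem.Dict.contains_eq_isSome_get?] at hc
          cases h : d.get? a <;> simp [h] at hc ⊢
        rw [hd, hxa, PySem.List.index?_cons_self]
        simp
      · rw [if_neg hxa]
        cases hd : d.get? x with
        | some v => simp
        | none =>
          rw [PySem.List.index?_cons_of_ne rest (Ne.symm hxa)]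
          cases hix : PySem.List.index? rest x with
          | none => simp
          | some k => simp; ring

-- nonneg-or-none invariant of B's min fold
def NN (o : Option Int) : Prop := o = none ∨ ∃ b, o = some b ∧ 0 ≤ b

theorem omin_nn {f : String → Option Int} (hf : ∀ x j, f x = some j → 0 ≤ j)
    {acc : Option Int} (ha : NN acc) (x : String) : NN (omin acc (f x)) := by
  cases hj : f x with
  | none => simpa [omin, hj] using ha
  | some j =>
    have hj0 := hf x j hj
    rcases ha with h | ⟨b, rfl, hb⟩
    · subst h; exact Or.inr ⟨j, by simp [omin, hj], hj0⟩
    · simp only [omin, hj]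
      split
      · exact Or.inr ⟨j, rfl, hj0⟩
      · exact Or.inr ⟨b, rfl, hb⟩

theorem foldl_omin_nn (f : String → Option Int) (hf : ∀ x j, f x = some j → 0 ≤ j)
    (l : List String) (acc : Option Int) (ha : NN acc) :
    NN (l.foldl (fun b x => omin b (f x)) acc) := by
  induction l generalizing acc with
  | nil => exact ha
  | cons x r ih => exact ih _ (omin_nn hf ha x)

-- some 0 absorbs under a nowhere-negative f
theorem foldl_omin_zero (f : String → Option Int) (hf : ∀ x j, f x = some j → 0 ≤ j)
    (l : List String) : l.foldl (fun b x => omin b (f x)) (some 0) = some 0 := by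
  induction l with
  | nil => rfl
  | cons x r ih =>
    have h : omin (some 0) (f x) = some 0 := by
      cases hj : f x with
      | none => simp [omin]
      | some j =>
        have := hf x j hj
        simp only [omin]
        rw [if_neg (by omega)]
    rw [List.foldl_cons, h, ih]

-- with a zero hit somewhere in the list, the fold is some 0
theorem foldl_omin_hit_zero (f : String → Option Int) (hf : ∀ x j, f x = some j → 0 ≤ j)
    (l : List String) (a : String) (hal : a ∈ l) (h0 : f a = some 0)
    (acc : Option Int) (ha : NN acc) :
    l.foldl (fun b x => omin b (f x)) acc = some 0 := by
  induction l generalizing acc with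
  | nil => cases hal
  | cons x r ih =>
    rw [List.foldl_cons]
    by_cases hx : x = a
    · subst hx
      have h : omin acc (f x) = some 0 := by
        rw [h0]
        rcases ha with h | ⟨b, rfl, hb⟩
        · simp [h, omin]
        · simp only [omin]
          split
          · rfl
          · congr 1; omega
      rw [h, foldl_omin_zero f hf r]
    · rcases List.mem_cons.1 hal with h | h
      · exact absurd h.symm hx
      · exact ih h _ (omin_nn hf ha x)

-- the shift lemma: adding 1 to every index commutes with the min fold
theorem foldl_omin_shift (f : String → Option Int) (l : List String) (acc : Option Int) :
    l.foldl (fun b x => omin b ((f x).map (· + 1))) (acc.map (· + 1)) =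
      (l.foldl (fun b x => omin b (f x)) acc).map (· + 1) := by
  induction l generalizing acc with
  | nil => rfl
  | cons x r ih =>
    rw [List.foldl_cons, List.foldl_cons, ← ih]
    congr 1
    cases hj : f x with
    | none => simp [omin]
    | some j =>
      cases acc with
      | none => simp [omin]
      | some b =>
        simp only [omin, Option.map_some]
        by_cases h : j < b
        · rw [if_pos h, if_pos (by omega)]; rfl
        · rw [if_neg h, if_neg (by omega)]; rfl

def idxF (s2 : List String) (x : String) : Option Int :=
  (PySem.List.index? s2 x).map (fun (k : Nat) => (k : Int))

theorem idxF_nonneg (s2 : List String) : ∀ x j, idxF s2 x = some j → 0 ≤ j := by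
  intro x j h
  unfold idxF at h
  rcases Option.map_eq_some_iff.1 h with ⟨k, _, hkj⟩
  exact hkj ▸ Int.natCast_nonneg k

-- B's min-index fold followed by indexing equals List.find? of membership in s1
theorem alt_core (s2 s1 : List String) :
    (match s1.foldl (fun b x => omin b (idxF s2 x)) none with
      | none => (none : Option String)
      | some b => PySem.List.pyGet? s2 b) = s2.find? (fun x => decide (x ∈ s1)) := by
  induction s2 generalizing s1 with
  | nil =>
    have h : ∀ l : List String, l.foldl (fun b x => omin b (idxF ([] : List String) x)) none = none := by
      intro l
      induction l with
      | nil => rfl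
      | cons x r ih => simpa [idxF, omin] using ih
    simp [h s1]
  | cons a rest ih =>
    by_cases ha : a ∈ s1
    · have h0 : idxF (a :: rest) a = some 0 := by
        unfold idxF; rw [PySem.List.index?_cons_self]; rfl
      rw [foldl_omin_hit_zero _ (idxF_nonneg _) s1 a ha h0 none (Or.inl rfl)]
      simp [PySem.List.pyGet?_zero_cons, List.find?_cons, ha]
    · have hcong : s1.foldl (fun b x => omin b (idxF (a :: rest) x)) none =
          s1.foldl (fun b x => omin b ((idxF rest x).map (· + 1))) none := by
        apply PySem.List.foldl_congr_mem
        intro acc x hx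
        have hxa : a ≠ x := fun h => ha (h ▸ hx)
        congr 1
        unfold idxF
        rw [PySem.List.index?_cons_of_ne rest hxa]
        cases hix : PySem.List.index? rest x with
        | none => simp
        | some k => simp
      rw [hcong]
      have hsh := foldl_omin_shift (idxF rest) s1 none
      simp only [Option.map_none] at hsh
      rw [hsh]
      have hnn := foldl_omin_nn (idxF rest) (idxF_nonneg rest) s1 none (Or.inl rfl)
      have ih1 := ih s1
      rcases hnn with h | ⟨b, hb, hb0⟩
      · rw [h] at ih1 ⊢
        simpa [List.find?_cons, ha] using ih1
      · rw [hb] at ih1 ⊢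
        obtain ⟨n, rfl⟩ := Int.eq_ofNat_of_zero_le hb0
        have ih2 : PySem.List.pyGet? rest (n : Int) =
            List.find? (fun x => decide (x ∈ s1)) rest := ih1
        simp only [Option.map_some]
        rw [PySem.List.pyGet?_cons_succ, ih2]
        simp [List.find?_cons, ha]

-- the dict B builds answers idxF
theorem get?_alt_pos (s2 : List String) (x : String) :
    (first_sim_pt1_alt_pos s2).get? x = idxF s2 x := by
  unfold first_sim_pt1_alt_pos
  rw [get?_posFold]
  simp only [PySem.Dict.get?_empty, idxF]
  cases hix : PySem.List.index? s2 x with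
  | none => simp
  | some k => simp

-- B's second loop is the omin fold over idxF
theorem fold_port_eq (s2 s1 : List String) :
    s1.foldl
      (fun best x =>
        match (first_sim_pt1_alt_pos s2).get? x with
        | none => best
        | some j =>
          match best with
          | none => some j
          | some b => if j < b then some j else some b) none
      = s1.foldl (fun b x => omin b (idxF s2 x)) none := by
  apply PySem.List.foldl_congr_mem
  intro acc x _
  rw [get?_alt_pos]
  rfl

theorem alt_eq_find? (s1 s2 : List String) :
    first_sim_pt1_alt s1 s2 = s2.find? (fun x => decide (x ∈ s1)) := by
  unfold first_sim_pt1_alt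
  simp only []
  rw [fold_port_eq]
  exact alt_core s2 s1

-- ===== VERDICT (by name: the statement is the Claim_ definition above) =====
theorem first_sim_pt1_spec : Claim_equal_first_sim_pt1 := by
  intro s1 s2 _
  unfold Spec_first_sim_pt1
  rw [first_sim_pt1_eq_find?, alt_eq_find?]
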